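-- pv_equiv track=rewrite | github.com/greyy126/Marketing-Campaign-Automation | app.py | parse_report_header
-- ===== SOURCE A (Python) =====
-- def parse_report_header(text: str) -> tuple[str | None, str | None]:
--     title = None
--     subtitle = None
--     for line in text.splitlines():
--         stripped = line.strip()
--         if stripped.startswith("# ") and title is None:
--             title = stripped[2:].strip()
--         elif stripped.startswith("_") and stripped.endswith("_") and subtitle is None:
--             subtitle = stripped.strip("_").strip()
--             break
--     return title, subtitle
-- ===== SOURCE B (Python) =====
-- def _find_subtitle(lines):
--     for i, line in enumerate(lines):
--         s = line.strip()
--         if s.startswith("_") and s.endswith("_"):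
--             return i, s.strip("_").strip()
--     return None
--
--
-- def _find_title(lines):
--     for line in lines:
--         s = line.strip()
--         if s.startswith("# "):
--             return s[2:].strip()
--     return None
--
--
-- def parse_report_header(text: str) -> tuple[str | None, str | None]:
--     lines = text.splitlines()
--     found = _find_subtitle(lines)
--     if found is None:
--         return _find_title(lines), None
--     i, subtitle = found
--     return _find_title(lines[:i]), subtitle
-- ===== Notes on version B (the rewrite author's own statement) =====
-- stated objective: alternative
-- what changed: Replaces the single interleaved stateful loop with two independent passes: first locate the subtitle line and its index, then search only the prefix before it (or all lines if none) for the title.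
import Mathlib
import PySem

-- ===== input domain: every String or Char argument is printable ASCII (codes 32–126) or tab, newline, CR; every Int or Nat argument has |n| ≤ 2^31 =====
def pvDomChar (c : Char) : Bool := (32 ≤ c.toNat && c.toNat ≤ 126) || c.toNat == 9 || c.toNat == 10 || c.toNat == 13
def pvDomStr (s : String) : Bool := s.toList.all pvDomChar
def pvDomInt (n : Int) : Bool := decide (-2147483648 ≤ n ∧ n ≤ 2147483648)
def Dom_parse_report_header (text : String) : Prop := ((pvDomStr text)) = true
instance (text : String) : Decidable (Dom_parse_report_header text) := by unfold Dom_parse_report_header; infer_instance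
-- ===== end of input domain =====

-- B replaces A's single interleaved stateful loop by two passes: first find the
-- subtitle line and its index, then search only the prefix before it for the title
-- (objective: alternative decomposition, same cost).

-- ===== PORT A =====
-- A's loop over splitlines carrying (title, subtitle); the elif-break returns directly.
def pvA_loop : List String → Option String → Option String → Option String × Option String
  | [], title, subtitle => (title, subtitle)
  | line :: rest, title, subtitle =>
    let stripped := PySem.Str.strip line
    if PySem.Str.startswith stripped "# " && title.isNone then
      pvA_loop rest (some (PySem.Str.strip (PySem.Str.slice stripped (some 2) none))) subtitle
    else if PySem.Str.startswith stripped "_" && PySem.Str.endswith stripped "_" && subtitle.isNone then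
      (title, some (PySem.Str.strip (PySem.Str.stripChars stripped "_")))
    else
      pvA_loop rest title subtitle

def parse_report_header (text : String) : Option String × Option String :=
  pvA_loop (PySem.Str.splitlines text) none none

-- ===== PORT B =====
-- Source B's _find_subtitle: first line whose strip starts and ends with '_', with its index.
def pvB_findSubtitle : List String → Option (Nat × String)
  | [] => none
  | line :: rest =>
    let s := PySem.Str.strip line
    if PySem.Str.startswith s "_" && PySem.Str.endswith s "_" then
      some (0, PySem.Str.strip (PySem.Str.stripChars s "_"))
    else
      (pvB_findSubtitle rest).map (fun p => (p.1 + 1, p.2))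

-- Source B's _find_title: first line whose strip starts with '# '.
def pvB_findTitle : List String → Option String
  | [] => none
  | line :: rest =>
    let s := PySem.Str.strip line
    if PySem.Str.startswith s "# " then
      some (PySem.Str.strip (PySem.Str.slice s (some 2) none))
    else
      pvB_findTitle rest

def parse_report_header_alt (text : String) : Option String × Option String :=
  let lines := PySem.Str.splitlines text
  match pvB_findSubtitle lines with
  | none => (pvB_findTitle lines, none)
  | some (i, subtitle) => (pvB_findTitle (PySem.List.slice lines none (some (i : Int))), some subtitle)

-- ===== PRECONDITION & SPEC =====
def Spec_parse_report_header (text : String) (out : Option String × Option String) : Prop := out = parse_report_header_alt text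
instance (text : String) (out : Option String × Option String) : Decidable (Spec_parse_report_header text out) := by unfold Spec_parse_report_header; infer_instance

-- ===== CLAIM (what is proved, stated in full; the proofs are below) =====
def Claim_equal_parse_report_header : Prop := ∀ (text : String), Dom_parse_report_header text → Spec_parse_report_header text (parse_report_header text)

-- ===== LEMMAS AND PROOFS =====

-- a stripped line that starts with "# " cannot start with "_"
lemma pv_hash_not_underscore (cs : List Char)
    (h : PySem.Chars.startswith cs ['#', ' '] = true) :
    PySem.Chars.startswith cs ['_'] = false := by
  rw [PySem.Chars.startswith_iff] at h
  by_contra hc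
  rw [Bool.not_eq_false, PySem.Chars.startswith_iff] at hc
  cases cs with
  | nil => simp at h
  | cons c cs' =>
    have h1 := (List.cons_prefix_cons.mp h).1
    have h2 := (List.cons_prefix_cons.mp hc).1
    rw [← h1] at h2
    exact absurd h2 (by decide)

-- with a title already found, A's loop only looks for the subtitle
lemma pvA_loop_some (ls : List String) (t : String) :
    pvA_loop ls (some t) none = (some t, (pvB_findSubtitle ls).map (·.2)) := by
  induction ls with
  | nil => simp [pvA_loop, pvB_findSubtitle]
  | cons line rest ih =>
    by_cases hc : PySem.Chars.startswith (PySem.Chars.strip line.toList) ['_'] = true ∧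
        PySem.Chars.endswith (PySem.Chars.strip line.toList) ['_'] = true
    · simp [pvA_loop, pvB_findSubtitle, hc.1, hc.2]
    · simp [pvA_loop, pvB_findSubtitle, hc, ih, Option.map_map]
      cases pvB_findSubtitle rest <;> rfl

-- A's loop from the initial state equals B's two-pass decomposition
lemma pvA_loop_none (ls : List String) :
    pvA_loop ls none none =
      (match pvB_findSubtitle ls with
       | none => (pvB_findTitle ls, none)
       | some (i, subtitle) => (pvB_findTitle (ls.take i), some subtitle)) := by
  induction ls with
  | nil => simp [pvA_loop, pvB_findSubtitle, pvB_findTitle]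
  | cons line rest ih =>
    by_cases ht : PySem.Chars.startswith (PySem.Chars.strip line.toList) ['#', ' '] = true
    · have hu : PySem.Chars.startswith (PySem.Chars.strip line.toList) ['_'] = false :=
        pv_hash_not_underscore _ ht
      cases hfs : pvB_findSubtitle rest with
      | none => simp [pvA_loop, pvB_findSubtitle, pvB_findTitle, ht, hu, hfs, pvA_loop_some]
      | some p =>
        obtain ⟨i, sub⟩ := p
        simp [pvA_loop, pvB_findSubtitle, pvB_findTitle, ht, hu, hfs, pvA_loop_some,
          List.take_succ_cons]
    · by_cases hs : PySem.Chars.startswith (PySem.Chars.strip line.toList) ['_'] = true ∧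
          PySem.Chars.endswith (PySem.Chars.strip line.toList) ['_'] = true
      · simp [pvA_loop, pvB_findSubtitle, pvB_findTitle, ht, hs.1, hs.2]
      · cases hfs : pvB_findSubtitle rest with
        | none => simp [pvA_loop, pvB_findSubtitle, pvB_findTitle, ht, hs, hfs, ih]
        | some p =>
          obtain ⟨i, sub⟩ := p
          simp [pvA_loop, pvB_findSubtitle, pvB_findTitle, ht, hs, hfs, ih, List.take_succ_cons]

-- ===== VERDICT (by name: the statement is the Claim_ definition above) =====
theorem parse_report_header_spec : Claim_equal_parse_report_header := by
  intro text _
  unfold Spec_parse_report_header parse_report_header parse_report_header_alt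
  rw [pvA_loop_none]
  cases h : pvB_findSubtitle (PySem.Str.splitlines text) with
  | none => simp [h]
  | some p =>
    obtain ⟨i, sub⟩ := p
    simp [h, PySem.List.slice_to_natCast]
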